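-- pv_equiv track=rewrite | github.com/ReginaKirana/ExecuRizz | Practice 4 - Decrease and Conquer/Spy x Family Code Blue/spyxfamily.py | minTime_CollectClues
-- ===== SOURCE A (Python) =====
-- def minTime_CollectClues(ranks, clue):
--     def canCollect_inTime(time):
--         total_clues = 0
--         for rank in ranks:
--             n = 0
--             while (rank * (n + 1) ** 2) <= time:
--                 n += 1
--                 total_clues += 1
--                 if total_clues >= clue:
--                     return True
--         return False
--
--     left, right = 0, max(ranks) * (clue ** 2)
--     while left < right:
--         mid = (left + right) // 2
--         if canCollect_inTime(mid):
--             right = mid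
--         else:
--             left = mid + 1
--
--     return left
-- ===== SOURCE B (Python) =====
-- def minTime_CollectClues(ranks, clue):
--     # a non-positive rank yields clues at time 0; a non-positive clue needs no time
--     if min(ranks) <= 0 or clue <= 0:
--         return 0
--
--     def _isqrt(m):
--         # floor square root by bisection on the root
--         lo, hi = 0, m + 1
--         while lo + 1 < hi:
--             mid = (lo + hi) // 2
--             if mid * mid <= m:
--                 lo = mid
--             else:
--                 hi = mid
--         return lo
--
--     def count_by(t):
--         # closed-form count of pairs (rank, k>=1) with rank*k*k <= t
--         return sum(_isqrt(t // r) for r in ranks)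
--
--     def search(lo, hi):
--         if lo >= hi:
--             return lo
--         mid = (lo + hi) // 2
--         if count_by(mid) >= clue:
--             return search(lo, mid)
--         return search(mid + 1, hi)
--
--     return search(0, max(ranks) * clue * clue)
-- ===== Notes on version B (the rewrite author's own statement) =====
-- stated objective: faster
-- what changed: A counts collectible clues by incrementally stepping k for every rank (up to clue increments per probe, with an early-return counter); B replaces that whole inner scan by a closed form -- per rank the count of k with rank*k^2 <= t is the integer square root of t//rank, computed by O(log t) bisection -- and bisects the answer recursively, so no per-clue work remains.
-- intended difference: For clue < 0 with all ranks positive, A returns min(ranks) (an artefact of its early-return counter test sitting inside the increment loop); B returns 0, the intended answer since no time is needed to collect a non-positive number of clues. — e.g. on minTime_CollectClues([2], -1): A returns 2, B returns 0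
import Mathlib
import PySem

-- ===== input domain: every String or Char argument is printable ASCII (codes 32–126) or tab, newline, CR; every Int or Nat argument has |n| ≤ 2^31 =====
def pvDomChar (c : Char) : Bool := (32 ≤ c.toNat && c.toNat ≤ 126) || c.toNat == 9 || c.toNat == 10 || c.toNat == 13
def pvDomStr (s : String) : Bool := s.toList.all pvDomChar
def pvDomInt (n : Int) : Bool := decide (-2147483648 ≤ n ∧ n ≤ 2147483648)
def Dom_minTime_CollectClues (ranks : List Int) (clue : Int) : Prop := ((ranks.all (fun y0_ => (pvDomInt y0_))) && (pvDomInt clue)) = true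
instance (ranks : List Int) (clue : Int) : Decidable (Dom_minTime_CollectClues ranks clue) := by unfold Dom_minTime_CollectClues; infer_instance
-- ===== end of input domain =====

-- B replaces A's per-clue incremental counting by a closed-form integer-square-root count (faster);
-- return-value equivalence only (neither program mutates its arguments).

-- ===== PORT A =====
-- inner 'while' of canCollect_inTime; the fuel argument only makes the loop total
-- (it is never exhausted on the inputs the claims admit)
def pvInnerA (rank time clue : Int) : Nat → Int → Int → Bool × Int
  | 0, _, total => (false, total)
  | fuel + 1, n, total =>
    if rank * (n + 1) ^ 2 ≤ time then
      if total + 1 ≥ clue then (true, total + 1)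
      else pvInnerA rank time clue fuel (n + 1) (total + 1)
    else (false, total)

-- canCollect_inTime: 'for rank in ranks' with an early return, as a fold over (returned?, total_clues)
def pvCanCollect (ranks : List Int) (clue time : Int) : Bool :=
  (ranks.foldl
    (fun st rank =>
      if st.1 then st
      else pvInnerA rank time clue (time.toNat + clue.toNat + 2) 0 st.2)
    (false, 0)).1

-- the outer 'while left < right' binary search of A
def pvSearchA (ranks : List Int) (clue left right : Int) : Int :=
  if left < right then
    let mid := PySem.Int.floordiv (left + right) 2
    if pvCanCollect ranks clue mid then pvSearchA ranks clue left mid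
    else pvSearchA ranks clue (mid + 1) right
  else left
termination_by (right - left).toNat
decreasing_by
  · have h1 := (PySem.Int.le_floordiv_iff_mul_le (a := left + right) (q := left) (by omega : (0:Int) < 2)).2 (by omega)
    have h2 := (PySem.Int.floordiv_lt_iff_lt_mul (a := left + right) (q := right) (by omega : (0:Int) < 2)).2 (by omega)
    omega
  · have h1 := (PySem.Int.le_floordiv_iff_mul_le (a := left + right) (q := left) (by omega : (0:Int) < 2)).2 (by omega)
    have h2 := (PySem.Int.floordiv_lt_iff_lt_mul (a := left + right) (q := right) (by omega : (0:Int) < 2)).2 (by omega)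
    omega

-- max(ranks) raises on []; excluded by Pre_, so the total port reads a default there
def minTime_CollectClues (ranks : List Int) (clue : Int) : Int :=
  pvSearchA ranks clue 0 (((PySem.List.max? ranks (fun x => x)).getD 0) * clue ^ 2)

-- ===== PORT B =====
-- _isqrt: floor square root by bisection on the root
def pvIsqrtLoop (m lo hi : Int) : Int :=
  if lo + 1 < hi then
    let mid := PySem.Int.floordiv (lo + hi) 2
    if mid * mid ≤ m then pvIsqrtLoop m mid hi
    else pvIsqrtLoop m lo mid
  else lo
termination_by (hi - lo).toNat
decreasing_by
  · have h1 := (PySem.Int.le_floordiv_iff_mul_le (a := lo + hi) (q := lo + 1) (by omega : (0:Int) < 2)).2 (by omega)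
    have h2 := (PySem.Int.floordiv_lt_iff_lt_mul (a := lo + hi) (q := hi) (by omega : (0:Int) < 2)).2 (by omega)
    omega
  · have h1 := (PySem.Int.le_floordiv_iff_mul_le (a := lo + hi) (q := lo + 1) (by omega : (0:Int) < 2)).2 (by omega)
    have h2 := (PySem.Int.floordiv_lt_iff_lt_mul (a := lo + hi) (q := hi) (by omega : (0:Int) < 2)).2 (by omega)
    omega

def pvIsqrt (m : Int) : Int := pvIsqrtLoop m 0 (m + 1)

-- count_by: closed-form count of pairs (rank, k ≥ 1) with rank*k*k ≤ t
def pvCountBy (ranks : List Int) (t : Int) : Int :=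
  (ranks.map (fun r => pvIsqrt (PySem.Int.floordiv t r))).sum

-- search: recursive bisection of the answer
def pvSearchB (ranks : List Int) (clue lo hi : Int) : Int :=
  if lo ≥ hi then lo
  else
    let mid := PySem.Int.floordiv (lo + hi) 2
    if pvCountBy ranks mid ≥ clue then pvSearchB ranks clue lo mid
    else pvSearchB ranks clue (mid + 1) hi
termination_by (hi - lo).toNat
decreasing_by
  · have h1 := (PySem.Int.le_floordiv_iff_mul_le (a := lo + hi) (q := lo) (by omega : (0:Int) < 2)).2 (by omega)
    have h2 := (PySem.Int.floordiv_lt_iff_lt_mul (a := lo + hi) (q := hi) (by omega : (0:Int) < 2)).2 (by omega)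
    omega
  · have h1 := (PySem.Int.le_floordiv_iff_mul_le (a := lo + hi) (q := lo) (by omega : (0:Int) < 2)).2 (by omega)
    have h2 := (PySem.Int.floordiv_lt_iff_lt_mul (a := lo + hi) (q := hi) (by omega : (0:Int) < 2)).2 (by omega)
    omega

-- min(ranks) raises on []; excluded by Pre_, so the total port reads a default there
def minTime_CollectClues_alt (ranks : List Int) (clue : Int) : Int :=
  if (PySem.List.min? ranks (fun x => x)).getD 0 ≤ 0 ∨ clue ≤ 0 then 0
  else pvSearchB ranks clue 0 (((PySem.List.max? ranks (fun x => x)).getD 0) * clue * clue)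

-- ===== PRECONDITION & SPEC =====
-- Pre_ excludes only ranks = [], where Python A raises ValueError (max of an empty sequence)
def Pre_minTime_CollectClues (ranks : List Int) (clue : Int) : Prop := ranks ≠ []
instance (ranks : List Int) (clue : Int) : Decidable (Pre_minTime_CollectClues ranks clue) := by unfold Pre_minTime_CollectClues; infer_instance

def pvWitness_minTime_CollectClues : List Int × Int := ([2, 5], 3)

-- For clue < 0 with all ranks positive, A returns min(ranks) (an artefact of its early-return counter
-- test sitting inside the increment loop); B returns 0, the intended answer since no time is needed to
-- collect a non-positive number of clues.
def D_minTime_CollectClues (ranks : List Int) (clue : Int) : Prop :=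
  clue < 0 ∧ ∀ r ∈ ranks, 0 < r
instance (ranks : List Int) (clue : Int) : Decidable (D_minTime_CollectClues ranks clue) := by unfold D_minTime_CollectClues; infer_instance

def Spec_minTime_CollectClues (ranks : List Int) (clue : Int) (out : Int) : Prop :=
  ¬ D_minTime_CollectClues ranks clue → out = minTime_CollectClues_alt ranks clue
instance (ranks : List Int) (clue : Int) (out : Int) : Decidable (Spec_minTime_CollectClues ranks clue out) := by unfold Spec_minTime_CollectClues; infer_instance

def pvDiffWitness_minTime_CollectClues : List Int × Int := ([2], -1)
def pvDiffWitnessOut_minTime_CollectClues : Int × Int := (2, 0)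

-- ===== CLAIM (what is proved, stated in full; the proofs are below) =====
def Claim_unchanged_minTime_CollectClues : Prop := ∀ (ranks : List Int) (clue : Int), Dom_minTime_CollectClues ranks clue → Pre_minTime_CollectClues ranks clue → Spec_minTime_CollectClues ranks clue (minTime_CollectClues ranks clue)
def Claim_changed_minTime_CollectClues : Prop := Dom_minTime_CollectClues (pvDiffWitness_minTime_CollectClues.1) (pvDiffWitness_minTime_CollectClues.2) ∧ Pre_minTime_CollectClues (pvDiffWitness_minTime_CollectClues.1) (pvDiffWitness_minTime_CollectClues.2) ∧ D_minTime_CollectClues (pvDiffWitness_minTime_CollectClues.1) (pvDiffWitness_minTime_CollectClues.2) ∧ minTime_CollectClues (pvDiffWitness_minTime_CollectClues.1) (pvDiffWitness_minTime_CollectClues.2) = pvDiffWitnessOut_minTime_CollectClues.1 ∧ minTime_CollectClues_alt (pvDiffWitness_minTime_CollectClues.1) (pvDiffWitness_minTime_CollectClues.2) = pvDiffWitnessOut_minTime_CollectClues.2 ∧ pvDiffWitnessOut_minTime_CollectClues.1 ≠ pvDiffWitnessOut_minTime_CollectClues.2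
def Claim_exact_minTime_CollectClues : Prop := ∀ (ranks : List Int) (clue : Int), Dom_minTime_CollectClues ranks clue → Pre_minTime_CollectClues ranks clue → D_minTime_CollectClues ranks clue → minTime_CollectClues ranks clue ≠ minTime_CollectClues_alt ranks clue

-- ===== LEMMAS AND PROOFS =====

theorem pvIsqrtLoop_spec (m : Int) : ∀ lo hi : Int, 0 ≤ lo → lo * lo ≤ m → m < hi * hi → lo < hi →
    0 ≤ pvIsqrtLoop m lo hi ∧ pvIsqrtLoop m lo hi * pvIsqrtLoop m lo hi ≤ m ∧
      m < (pvIsqrtLoop m lo hi + 1) * (pvIsqrtLoop m lo hi + 1) := by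
  intro lo hi
  fun_induction pvIsqrtLoop m lo hi with
  | case1 lo hi h mid hle ih =>
    intro h0 hlo hhi hlt
    have hmid : mid = PySem.Int.floordiv (lo + hi) 2 := rfl
    have h1 := (PySem.Int.le_floordiv_iff_mul_le (a := lo + hi) (q := lo + 1) (by omega : (0:Int) < 2)).2 (by omega)
    have h2 := (PySem.Int.floordiv_lt_iff_lt_mul (a := lo + hi) (q := hi) (by omega : (0:Int) < 2)).2 (by omega)
    exact ih (by omega) hle hhi (by omega)
  | case2 lo hi h mid hgt ih =>
    intro h0 hlo hhi hlt
    have hmid : mid = PySem.Int.floordiv (lo + hi) 2 := rfl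
    have h1 := (PySem.Int.le_floordiv_iff_mul_le (a := lo + hi) (q := lo + 1) (by omega : (0:Int) < 2)).2 (by omega)
    exact ih h0 hlo (by omega) (by omega)
  | case3 lo hi h =>
    intro h0 hlo hhi hlt
    have : hi = lo + 1 := by omega
    subst this
    exact ⟨h0, hlo, hhi⟩

theorem pvIsqrt_spec (m : Int) (hm : 0 ≤ m) :
    0 ≤ pvIsqrt m ∧ pvIsqrt m * pvIsqrt m ≤ m ∧ m < (pvIsqrt m + 1) * (pvIsqrt m + 1) := by
  have := pvIsqrtLoop_spec m 0 (m + 1) le_rfl (by nlinarith) (by nlinarith) (by omega)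
  simpa [pvIsqrt] using this

theorem pvCountOne_spec (r t : Int) (hr : 1 ≤ r) (ht : 0 ≤ t) :
    0 ≤ pvIsqrt (PySem.Int.floordiv t r) ∧
      ∀ k : Int, 1 ≤ k → (r * k ^ 2 ≤ t ↔ k ≤ pvIsqrt (PySem.Int.floordiv t r)) := by
  have hdiv : PySem.Int.floordiv t r = t / r := PySem.Int.floordiv_eq_ediv_of_pos (by omega)
  have hm : 0 ≤ t / r := Int.ediv_nonneg ht (by omega)
  obtain ⟨hL0, hL1, hL2⟩ := pvIsqrt_spec (PySem.Int.floordiv t r) (by rw [hdiv]; exact hm)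
  set L := pvIsqrt (PySem.Int.floordiv t r) with hLdef
  refine ⟨hL0, fun k hk => ?_⟩
  have hbr : r * k ^ 2 ≤ t ↔ k ^ 2 ≤ t / r := by
    rw [Int.le_ediv_iff_mul_le (by omega)]; constructor <;> intro h <;> nlinarith
  rw [hbr]
  rw [hdiv] at hL1 hL2
  constructor
  · intro h; nlinarith
  · intro h; nlinarith
theorem pvInnerA_snd_nonneg (rank time clue : Int) :
    ∀ (fuel : Nat) (n total : Int), 0 ≤ total → 0 ≤ (pvInnerA rank time clue fuel n total).2 := by
  intro fuel
  induction fuel with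
  | zero => intro n total h; simpa [pvInnerA] using h
  | succ fuel ih =>
    intro n total h
    simp only [pvInnerA]
    split
    · split
      · simpa using by omega
      · exact ih (n + 1) (total + 1) (by omega)
    · simpa using h

theorem pvInnerA_spec (rank time clue L : Int)
    (hchar : ∀ k : Int, 1 ≤ k → (rank * k ^ 2 ≤ time ↔ k ≤ L)) :
    ∀ (fuel : Nat) (n total : Int), 0 ≤ n → n ≤ L → total < clue → (L - n).toNat < fuel →
      pvInnerA rank time clue fuel n total =
        if clue ≤ total + (L - n) then (true, clue) else (false, total + (L - n)) := by
  intro fuel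
  induction fuel with
  | zero => intro n total h0 hnL htc hf; omega
  | succ fuel ih =>
    intro n total h0 hnL htc hf
    simp only [pvInnerA]
    have hcond := hchar (n + 1) (by omega)
    by_cases hc : n + 1 ≤ L
    · rw [if_pos (hcond.2 hc)]
      by_cases he : total + 1 ≥ clue
      · rw [if_pos he]
        have : clue = total + 1 := by omega
        rw [if_pos (by omega)]
        simp [this]
      · rw [if_neg he]
        rw [ih (n + 1) (total + 1) (by omega) hc (by omega) (by omega)]
        by_cases hq : clue ≤ total + (L - n)
        · rw [if_pos (by omega), if_pos hq]
        · rw [if_neg (by omega), if_neg hq]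
          congr 1
          omega
    · have hnL' : n = L := by omega
      rw [if_neg (fun h => hc (hcond.1 h))]
      rw [if_neg (by omega)]
      simp [hnL']

theorem pvInnerA_true_nonpos (rank time clue : Int) (hr : rank ≤ 0) (ht : 0 ≤ time) :
    ∀ (fuel : Nat) (n total : Int), 0 ≤ total → (clue - total).toNat < fuel →
      (pvInnerA rank time clue fuel n total).1 = true := by
  intro fuel
  induction fuel with
  | zero => intro n total h0 hf; omega
  | succ fuel ih =>
    intro n total h0 hf
    have hcond : rank * (n + 1) ^ 2 ≤ time :=
      le_trans (mul_nonpos_of_nonpos_of_nonneg hr (sq_nonneg _)) ht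
    simp only [pvInnerA, if_pos hcond]
    by_cases he : total + 1 ≥ clue
    · rw [if_pos he]
    · rw [if_neg he]
      exact ih (n + 1) (total + 1) (by omega) (by omega)
theorem pvFold_true (ranks : List Int) (clue time : Int) (x : Int) :
    ranks.foldl
      (fun st rank =>
        if st.1 then st
        else pvInnerA rank time clue (time.toNat + clue.toNat + 2) 0 st.2)
      (true, x) = (true, x) := by
  induction ranks with
  | nil => rfl
  | cons r rs ih => simpa using ih

theorem pvCountBy_sum_nonneg (rs : List Int) (t : Int) (ht : 0 ≤ t) (hpos : ∀ r ∈ rs, 0 < r) :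
    0 ≤ (rs.map (fun r => pvIsqrt (PySem.Int.floordiv t r))).sum := by
  apply List.sum_nonneg
  intro x hx
  obtain ⟨r, hr, rfl⟩ := List.mem_map.1 hx
  exact (pvCountOne_spec r t (hpos r hr) ht).1

theorem pvCanCollect_eq (ranks : List Int) (clue time : Int) (hc : 1 ≤ clue) (ht : 0 ≤ time)
    (hpos : ∀ r ∈ ranks, 0 < r) :
    pvCanCollect ranks clue time = decide (clue ≤ pvCountBy ranks time) := by
  have aux : ∀ rs : List Int, (∀ r ∈ rs, 0 < r) → ∀ total : Int, 0 ≤ total → total < clue →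
      (rs.foldl
        (fun st rank =>
          if st.1 then st
          else pvInnerA rank time clue (time.toNat + clue.toNat + 2) 0 st.2)
        (false, total)).1
      = decide (clue ≤ total + (rs.map (fun r => pvIsqrt (PySem.Int.floordiv time r))).sum) := by
    intro rs
    induction rs with
    | nil =>
      intro _ total h0 htc
      simp only [List.foldl_nil, List.map_nil, List.sum_nil, add_zero]
      have hnc : ¬ clue ≤ total := by omega
      simp [hnc]
    | cons r rs ih =>
      intro hp total h0 htc
      have hrpos : 0 < r := hp r (List.mem_cons_self ..)
      obtain ⟨hL0, hchar⟩ := pvCountOne_spec r time (by omega) ht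
      set L := pvIsqrt (PySem.Int.floordiv time r) with hLdef
      have hLle : L ≤ time := by
        by_cases h1 : 1 ≤ L
        · have := (hchar L h1).2 le_rfl
          nlinarith
        · omega
      have hsum : 0 ≤ (rs.map (fun r => pvIsqrt (PySem.Int.floordiv time r))).sum :=
        pvCountBy_sum_nonneg rs time ht (fun x hx => hp x (List.mem_cons_of_mem _ hx))
      simp only [List.foldl_cons, List.map_cons, List.sum_cons]
      simp only [Bool.false_eq_true, if_false]
      rw [pvInnerA_spec r time clue L hchar (time.toNat + clue.toNat + 2) 0 total le_rfl hL0 htc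
        (by omega)]
      by_cases hq : clue ≤ total + (L - 0)
      · rw [if_pos hq, pvFold_true]
        rw [show ((true, clue) : Bool × Int).1 = true from rfl, eq_comm, decide_eq_true_iff]
        omega
      · rw [if_neg hq, ih (fun x hx => hp x (List.mem_cons_of_mem _ hx)) (total + (L - 0))
          (by omega) (by omega)]
        congr 1
        apply propext
        constructor <;> intro <;> omega
  unfold pvCanCollect pvCountBy
  have := aux ranks hpos 0 le_rfl (by omega)
  simpa using this
theorem pvInnerA_zero_time (r clue total : Int) (f : Nat) (hr : 0 < r) :
    pvInnerA r 0 clue (f + 1) 0 total = (false, total) := by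
  simp only [pvInnerA]
  have : ¬ r * (0 + 1) ^ 2 ≤ 0 := by nlinarith
  rw [if_neg this]

theorem pvCanCollect_zero_false (ranks : List Int) (clue : Int) (hpos : ∀ r ∈ ranks, 0 < r) :
    pvCanCollect ranks clue 0 = false := by
  unfold pvCanCollect
  have hT : (0 : Int).toNat + clue.toNat + 2 = (clue.toNat + 1) + 1 := by omega
  have aux : ∀ rs : List Int, (∀ r ∈ rs, 0 < r) → ∀ total : Int,
      (rs.foldl
        (fun st rank =>
          if st.1 then st
          else pvInnerA rank 0 clue ((clue.toNat + 1) + 1) 0 st.2)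
        (false, total)).1 = false := by
    intro rs
    induction rs with
    | nil => intro _ total; rfl
    | cons r rs ih =>
      intro hp total
      simp only [List.foldl_cons, Bool.false_eq_true, if_false]
      rw [pvInnerA_zero_time r clue total _ (hp r (List.mem_cons_self ..))]
      exact ih (fun x hx => hp x (List.mem_cons_of_mem _ hx)) total
  simp only [hT]
  exact aux ranks hpos 0

theorem pvCanCollect_true_of_nonpos (ranks : List Int) (clue time : Int) (ht : 0 ≤ time)
    (h : ∃ r ∈ ranks, r ≤ 0) : pvCanCollect ranks clue time = true := by
  unfold pvCanCollect
  have aux : ∀ rs : List Int, (∃ r ∈ rs, r ≤ 0) → ∀ total : Int, 0 ≤ total →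
      (rs.foldl
        (fun st rank =>
          if st.1 then st
          else pvInnerA rank time clue (time.toNat + clue.toNat + 2) 0 st.2)
        (false, total)).1 = true := by
    intro rs
    induction rs with
    | nil => rintro ⟨r, hr, _⟩; simp at hr
    | cons r rs ih =>
      rintro ⟨r0, hr0mem, hr0⟩ total h0
      simp only [List.foldl_cons, Bool.false_eq_true, if_false]
      by_cases hfst : (pvInnerA r time clue (time.toNat + clue.toNat + 2) 0 total).1 = true
      · have heta : pvInnerA r time clue (time.toNat + clue.toNat + 2) 0 total =
          (true, (pvInnerA r time clue (time.toNat + clue.toNat + 2) 0 total).2) := by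
          rw [← hfst]
        rw [heta, pvFold_true]
      · rcases List.mem_cons.1 hr0mem with heq | hmem
        · exfalso
          apply hfst
          exact pvInnerA_true_nonpos r time clue (heq ▸ hr0) ht _ 0 total h0 (by omega)
        · have heta : pvInnerA r time clue (time.toNat + clue.toNat + 2) 0 total =
            (false, (pvInnerA r time clue (time.toNat + clue.toNat + 2) 0 total).2) := by
            rw [show false = (pvInnerA r time clue (time.toNat + clue.toNat + 2) 0 total).1 by
              simpa using hfst]
          rw [heta]
          exact ih ⟨r0, hmem, hr0⟩ _ (pvInnerA_snd_nonneg r time clue _ 0 total h0)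
  exact aux ranks h 0 le_rfl
theorem pvSearchB_stop (ranks : List Int) (clue lo hi : Int) (h : lo ≥ hi) :
    pvSearchB ranks clue lo hi = lo := by
  rw [pvSearchB]
  simp [h]

theorem pvSearchB_step (ranks : List Int) (clue lo hi : Int) (h : lo < hi) :
    pvSearchB ranks clue lo hi =
      if pvCountBy ranks (PySem.Int.floordiv (lo + hi) 2) ≥ clue then
        pvSearchB ranks clue lo (PySem.Int.floordiv (lo + hi) 2)
      else pvSearchB ranks clue (PySem.Int.floordiv (lo + hi) 2 + 1) hi := by
  rw [pvSearchB]
  simp [show ¬ lo ≥ hi by omega]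

theorem pvSearchA_eq_searchB (ranks : List Int) (clue : Int)
    (hP : ∀ t : Int, 0 ≤ t → pvCanCollect ranks clue t = decide (clue ≤ pvCountBy ranks t)) :
    ∀ left right : Int, 0 ≤ left → pvSearchA ranks clue left right = pvSearchB ranks clue left right := by
  intro left right
  fun_induction pvSearchA ranks clue left right with
  | case1 left right h mid hc ih =>
    intro h0
    have hmid : mid = PySem.Int.floordiv (left + right) 2 := rfl
    have h1 := (PySem.Int.le_floordiv_iff_mul_le (a := left + right) (q := left) (by omega : (0:Int) < 2)).2 (by omega)
    rw [pvSearchB_step ranks clue left right h]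
    rw [hP mid (by omega)] at hc
    simp only [decide_eq_true_iff] at hc
    rw [← hmid, if_pos (by simpa using hc)]
    exact ih h0
  | case2 left right h mid hc ih =>
    intro h0
    have hmid : mid = PySem.Int.floordiv (left + right) 2 := rfl
    have h1 := (PySem.Int.le_floordiv_iff_mul_le (a := left + right) (q := left) (by omega : (0:Int) < 2)).2 (by omega)
    rw [pvSearchB_step ranks clue left right h]
    rw [hP mid (by omega)] at hc
    simp only [decide_eq_true_iff] at hc
    rw [← hmid, if_neg (by simpa using hc)]
    exact ih (by omega)
  | case3 left right h =>
    intro h0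
    rw [pvSearchB_stop ranks clue left right (by omega)]

theorem pvSearchA_all_true (ranks : List Int) (clue : Int)
    (hP : ∀ t : Int, 0 ≤ t → pvCanCollect ranks clue t = true) :
    ∀ left right : Int, 0 ≤ left → pvSearchA ranks clue left right = left := by
  intro left right
  fun_induction pvSearchA ranks clue left right with
  | case1 left right h mid hc ih => intro h0; exact ih h0
  | case2 left right h mid hc ih =>
    intro h0
    have hmid : mid = PySem.Int.floordiv (left + right) 2 := rfl
    have h1 := (PySem.Int.le_floordiv_iff_mul_le (a := left + right) (q := left) (by omega : (0:Int) < 2)).2 (by omega)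
    rw [hP mid (by omega)] at hc
    exact absurd hc (by simp)
  | case3 left right h => intro h0; rfl

theorem pvSearchA_pos (ranks : List Int) (clue : Int)
    (hP0 : pvCanCollect ranks clue 0 = false) :
    ∀ left right : Int, 0 ≤ left → left < right → 0 < pvSearchA ranks clue left right := by
  intro left right
  fun_induction pvSearchA ranks clue left right with
  | case1 left right h mid hc ih =>
    intro h0 hlr
    have hmid : mid = PySem.Int.floordiv (left + right) 2 := rfl
    have h1 := (PySem.Int.le_floordiv_iff_mul_le (a := left + right) (q := left) (by omega : (0:Int) < 2)).2 (by omega)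
    by_cases hlm : left < mid
    · exact ih h0 hlm
    · have hml : mid = left := by omega
      rw [pvSearchA]
      rw [if_neg (by omega)]
      by_cases hp : 0 < left
      · exact hp
      · exfalso
        have : mid = 0 := by omega
        rw [this, hP0] at hc
        exact Bool.false_ne_true hc
  | case2 left right h mid hc ih =>
    intro h0 hlr
    have hmid : mid = PySem.Int.floordiv (left + right) 2 := rfl
    have h1 := (PySem.Int.le_floordiv_iff_mul_le (a := left + right) (q := left) (by omega : (0:Int) < 2)).2 (by omega)
    have h2 := (PySem.Int.floordiv_lt_iff_lt_mul (a := left + right) (q := right) (by omega : (0:Int) < 2)).2 (by omega)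
    by_cases hmr : mid + 1 < right
    · exact ih (by omega) hmr
    · rw [pvSearchA]
      rw [if_neg (by omega)]
      omega
  | case3 left right h => intro h0 hlr; omega

-- ===== VERDICT (by name: the statement is the Claim_ definition above) =====
theorem minTime_CollectClues_spec : Claim_unchanged_minTime_CollectClues := by
  intro ranks clue _hDom hPre
  unfold Spec_minTime_CollectClues
  intro hnD
  unfold minTime_CollectClues minTime_CollectClues_alt
  cases hmin : PySem.List.min? ranks (fun x => x) with
  | none => exact absurd ((PySem.List.min?_eq_none_iff ranks _).1 hmin) hPre
  | some m0 =>
    have hm0mem : m0 ∈ ranks := PySem.List.min?_mem hmin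
    have hm0min : ∀ y ∈ ranks, m0 ≤ y := PySem.List.min?_isMin hmin
    by_cases hm0 : m0 ≤ 0
    · -- a non-positive rank: A's predicate is always true, B's guard fires
      rw [if_pos (Or.inl (by simpa using hm0))]
      exact pvSearchA_all_true ranks clue
        (fun t ht => pvCanCollect_true_of_nonpos ranks clue t ht ⟨m0, hm0mem, hm0⟩) 0 _ le_rfl
    · have hpos : ∀ r ∈ ranks, 0 < r := fun r hr => lt_of_lt_of_le (by omega) (hm0min r hr)
      have hclue0 : 0 ≤ clue := by
        by_contra hneg
        exact hnD ⟨by omega, hpos⟩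
      by_cases hclue : clue ≤ 0
      · -- clue = 0: A's search interval is empty, B's guard fires
        have : clue = 0 := by omega
        subst this
        rw [if_pos (Or.inr le_rfl)]
        rw [pvSearchA]
        norm_num
      · -- the main case: same bisection over pointwise-equal predicates
        rw [if_neg (by simp; omega)]
        cases hmax : PySem.List.max? ranks (fun x => x) with
        | none => exact absurd ((PySem.List.max?_eq_none_iff ranks _).1 hmax) hPre
        | some M =>
          have hR : M * clue ^ 2 = M * clue * clue := by ring
          simp only [Option.getD_some, hR]
          exact pvSearchA_eq_searchB ranks clue
            (fun t ht => pvCanCollect_eq ranks clue t (by omega) ht hpos) 0 _ le_rfl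

theorem minTime_CollectClues_changed : Claim_changed_minTime_CollectClues := by
  unfold Claim_changed_minTime_CollectClues
  refine ⟨by decide, by decide, by decide, ?_, by decide, by decide⟩
  show minTime_CollectClues [2] (-1) = 2
  have hR : ((PySem.List.max? [2] (fun x => x)).getD 0) * (-1 : Int) ^ 2 = 2 := by decide
  have hmid : PySem.Int.floordiv (0 + 2) 2 = 1 := by decide
  have hcc : pvCanCollect [2] (-1) 1 = false := by decide
  have h2 : pvSearchA [2] (-1) 2 2 = 2 := by rw [pvSearchA]; norm_num
  have h1 : pvSearchA [2] (-1) 0 2 = 2 := by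
    rw [pvSearchA]
    norm_num [hmid, hcc, h2]
  unfold minTime_CollectClues
  rw [hR, h1]

theorem minTime_CollectClues_tight : Claim_exact_minTime_CollectClues := by
  intro ranks clue _hDom hPre hD
  obtain ⟨hclue, hpos⟩ := hD
  unfold minTime_CollectClues minTime_CollectClues_alt
  cases hmin : PySem.List.min? ranks (fun x => x) with
  | none => exact absurd ((PySem.List.min?_eq_none_iff ranks _).1 hmin) hPre
  | some m0 =>
    have hm0mem : m0 ∈ ranks := PySem.List.min?_mem hmin
    rw [if_pos (Or.inr (by omega))]
    cases hmax : PySem.List.max? ranks (fun x => x) with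
    | none => exact absurd ((PySem.List.max?_eq_none_iff ranks _).1 hmax) hPre
    | some M =>
      have hMmem : M ∈ ranks := PySem.List.max?_mem hmax
      have hM : 1 ≤ M := hpos M hMmem
      have hsq : 1 ≤ clue ^ 2 := by nlinarith
      have hRpos : 0 < M * clue ^ 2 := by nlinarith
      have := pvSearchA_pos ranks clue (pvCanCollect_zero_false ranks clue hpos) 0
        ((Option.getD (some M) 0) * clue ^ 2) le_rfl (by simpa using hRpos)
      omega
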